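-- pv_equiv track=rewrite | github.com/aymara/knowledgesrl | src/verbnetguess.py | strip_roles
-- ===== SOURCE A (Python) =====
-- def strip_roles(primary):
--     out_list = []
--
--     for part in primary.split(' '):
--         if '.' or '-' in part:
--             without_dot = part.split('.')[0]
--             without_dash = without_dot.split('-')[0]
--             out_list.append(without_dash)
--         else:
--             out_list.append(part)
--
--     return ' '.join(out_list)
-- ===== SOURCE B (Python) =====
-- def strip_roles(primary):
--     # one pass over the characters: once a '.' or '-' is seen, skip until the next space
--     out = []
--     skipping = False
--     for ch in primary:
--         if ch == ' ':
--             skipping = False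
--             out.append(ch)
--         elif skipping:
--             pass
--         elif ch == '.' or ch == '-':
--             skipping = True
--         else:
--             out.append(ch)
--     return ''.join(out)
-- ===== Notes on version B (the rewrite author's own statement) =====
-- stated objective: alternative
-- what changed: Replaces split-on-space / split-on-dot / split-on-dash / join with a single character scan that copies characters and, after the first '.' or '-' of a token, skips until the next space.
import Mathlib
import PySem

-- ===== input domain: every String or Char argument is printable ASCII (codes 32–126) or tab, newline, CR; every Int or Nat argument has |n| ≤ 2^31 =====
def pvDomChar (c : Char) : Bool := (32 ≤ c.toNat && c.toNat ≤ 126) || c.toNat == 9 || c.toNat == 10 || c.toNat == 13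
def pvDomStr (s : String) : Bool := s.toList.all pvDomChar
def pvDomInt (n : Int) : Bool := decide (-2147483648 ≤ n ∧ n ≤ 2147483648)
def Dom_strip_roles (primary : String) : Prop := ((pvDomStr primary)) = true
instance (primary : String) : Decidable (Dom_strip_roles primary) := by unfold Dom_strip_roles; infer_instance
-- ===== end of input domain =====

-- B replaces A's split-on-space / split-on-dot / split-on-dash / join pipeline by a single
-- character scan with a skip flag (alternative decomposition, same O(n) cost).

-- ===== PORT A =====
-- per-part body of A's loop: '.'-truthiness makes the condition always true, kept literally
def stripRolesPart (part : List Char) : List Char :=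
  if (true || PySem.Chars.isIn ['-'] part) = true then
    -- without_dot = part.split('.')[0]; without_dash = without_dot.split('-')[0]
    let withoutDot := PySem.List.pyGetD (PySem.Chars.splitOn part ['.']) 0 []
    let withoutDash := PySem.List.pyGetD (PySem.Chars.splitOn withoutDot ['-']) 0 []
    withoutDash
  else part

def strip_roles (primary : String) : String :=
  String.ofList (PySem.Chars.join [' ']
    ((PySem.Chars.splitOn primary.toList [' ']).foldl
      (fun out_list part => out_list ++ [stripRolesPart part]) []))

-- ===== PORT B =====
-- the character scan of Source B: copy chars; after a '.'/'-' skip until the next space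
def stripRolesScan : Bool → List Char → List Char
  | _, [] => []
  | skipping, c :: rest =>
    if c = ' ' then c :: stripRolesScan false rest
    else if skipping then stripRolesScan skipping rest
    else if c = '.' ∨ c = '-' then stripRolesScan true rest
    else c :: stripRolesScan skipping rest

def strip_roles_alt (primary : String) : String :=
  String.ofList (stripRolesScan false primary.toList)

-- ===== PRECONDITION & SPEC =====
def Spec_strip_roles (primary : String) (out : String) : Prop := out = strip_roles_alt primary
instance (primary : String) (out : String) : Decidable (Spec_strip_roles primary out) := by unfold Spec_strip_roles; infer_instance

-- ===== CLAIM (what is proved, stated in full; the proofs are below) =====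
def Claim_equal_strip_roles : Prop := ∀ (primary : String), Dom_strip_roles primary → Spec_strip_roles primary (strip_roles primary)

-- ===== LEMMAS AND PROOFS =====

-- splitOn with a one-char separator, in directly recursive form
def mySplit (d : Char) (pre : List Char) : List Char → List (List Char)
  | [] => [pre]
  | c :: l => if c = d then pre :: mySplit d [] l else mySplit d (pre ++ [c]) l

theorem go_eq (d : Char) : ∀ (fuel : Nat) (l cur : List Char) (acc : List (List Char)),
    l.length ≤ fuel →
    PySem.Chars.splitOn.go [d] fuel l cur acc = acc.reverse ++ mySplit d cur.reverse l := by
  intro fuel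
  induction fuel with
  | zero =>
    intro l cur acc h
    have : l = [] := by cases l <;> simp_all
    subst this
    simp [PySem.Chars.splitOn.go, mySplit]
  | succ n ih =>
    intro l cur acc h
    cases l with
    | nil => simp [PySem.Chars.splitOn.go, mySplit]
    | cons c rest =>
      simp only [PySem.Chars.splitOn.go]
      by_cases hc : c = d
      · simp [List.isPrefixOf, hc, ih rest [] (cur.reverse :: acc) (by simpa using h), mySplit]
      · simp [List.isPrefixOf, hc, Ne.symm hc, ih rest (c :: cur) acc (by simpa using h), mySplit]

theorem splitOn_single (d : Char) (l : List Char) :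
    PySem.Chars.splitOn l [d] = mySplit d [] l := by
  simpa using go_eq d (l.length + 1) l [] [] (by omega)

theorem mySplit_ne_nil (d : Char) (pre l : List Char) : mySplit d pre l ≠ [] := by
  induction l generalizing pre with
  | nil => simp [mySplit]
  | cons c t ih =>
    by_cases hc : c = d <;> simp [mySplit, hc, ih]

theorem mySplit_getD_zero (d : Char) : ∀ (l pre : List Char),
    (mySplit d pre l).getD 0 [] = pre ++ l.takeWhile (fun c => !(c == d)) := by
  intro l
  induction l with
  | nil => intro pre; simp [mySplit]
  | cons c t ih =>
    intro pre
    by_cases hc : c = d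
    · simp [mySplit, hc, List.takeWhile]
    · rw [show mySplit d pre (c :: t) = mySplit d (pre ++ [c]) t from by simp [mySplit, hc],
        ih]
      simp [List.takeWhile, beq_false_of_ne hc]

-- the "suffix survives" predicate of B's scan
def goodChar (c : Char) : Bool := !(c == '.') && !(c == '-')

theorem stripRolesPart_eq_takeWhile (p : List Char) :
    stripRolesPart p = p.takeWhile goodChar := by
  unfold stripRolesPart
  rw [if_pos (by simp)]
  simp only [splitOn_single, PySem.List.pyGetD_zero, mySplit_getD_zero,
    List.nil_append, List.takeWhile_takeWhile]
  · have hfe : (fun a => decide ((!(a == '-')) = true ∧ (!(a == '.')) = true)) = goodChar := by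
      funext c
      by_cases h1 : c = '.' <;> by_cases h2 : c = '-' <;> simp [goodChar, h1, h2]
    rw [hfe]

theorem takeWhile_append_of_all {p : Char → Bool} (pre l : List Char)
    (h : ∀ c ∈ pre, p c = true) :
    (pre ++ l).takeWhile p = pre ++ l.takeWhile p := by
  induction pre with
  | nil => simp
  | cons c t ih => simp_all

theorem takeWhile_append_of_not_all {p : Char → Bool} (pre l : List Char)
    (h : ¬ ∀ c ∈ pre, p c = true) :
    (pre ++ l).takeWhile p = pre.takeWhile p := by
  induction pre with
  | nil => simp_all
  | cons c t ih =>
    by_cases hc : p c = true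
    · have : ¬ ∀ x ∈ t, p x = true := by simp_all
      simp_all
    · simp [List.takeWhile, hc]

theorem join_map_cut_mySplit : ∀ (l pre : List Char) (skip : Bool),
    (skip = false → ∀ c ∈ pre, goodChar c = true) →
    (skip = true → ¬ ∀ c ∈ pre, goodChar c = true) →
    PySem.Chars.join [' '] ((mySplit ' ' pre l).map (List.takeWhile goodChar)) =
      pre.takeWhile goodChar ++ stripRolesScan skip l := by
  intro l
  induction l with
  | nil =>
    intro pre skip _ _
    simp [mySplit, PySem.Chars.join_singleton, stripRolesScan]
  | cons c t ih =>
    intro pre skip h0 h1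
    by_cases hsp : c = ' '
    · subst hsp
      obtain ⟨q, rest, hq⟩ : ∃ q rest, mySplit ' ' [] t = q :: rest := by
        cases hmt : mySplit ' ' [] t with
        | nil => exact absurd hmt (mySplit_ne_nil _ _ _)
        | cons q rest => exact ⟨q, rest, rfl⟩
      have iht := ih [] false (by simp) (by simp)
      rw [show mySplit ' ' pre (' ' :: t) = pre :: mySplit ' ' [] t from by simp [mySplit]]
      rw [hq] at iht ⊢
      simp only [List.map_cons] at iht ⊢
      rw [PySem.Chars.join_cons_cons, iht]
      simp [stripRolesScan]
    · cases skip with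
      | true =>
        have hna : ¬ ∀ x ∈ pre, goodChar x = true := h1 rfl
        have hna' : ¬ ∀ x ∈ pre ++ [c], goodChar x = true := by
          intro hall; exact hna (fun x hx => hall x (by simp [hx]))
        have := ih (pre ++ [c]) true (by simp) (fun _ => hna')
        simp only [mySplit, if_neg hsp, this,
          takeWhile_append_of_not_all pre [c] hna]
        simp [stripRolesScan, hsp]
      | false =>
        have hall : ∀ x ∈ pre, goodChar x = true := h0 rfl
        by_cases hg : goodChar c = true
        · have hall' : ∀ x ∈ pre ++ [c], goodChar x = true := by
            intro x hx; rcases List.mem_append.1 hx with h | h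
            · exact hall x h
            · simp at h; subst h; exact hg
          have := ih (pre ++ [c]) false (fun _ => hall') (by simp)
          simp only [mySplit, if_neg hsp, this,
            takeWhile_append_of_all pre [c] hall]
          have hcd : ¬ (c = '.' ∨ c = '-') := by
            simp [goodChar] at hg; tauto
          have hpre : pre.takeWhile goodChar = pre := List.takeWhile_eq_self_iff.2 hall
          simp [stripRolesScan, hsp, hcd, List.takeWhile, hg, hpre]
        · have hna' : ¬ ∀ x ∈ pre ++ [c], goodChar x = true := by
            intro hall'; exact hg (hall' c (by simp))
          have := ih (pre ++ [c]) true (by simp) (fun _ => hna')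
          simp only [mySplit, if_neg hsp, this]
          have hpre : pre.takeWhile goodChar = pre := List.takeWhile_eq_self_iff.2 hall
          have hcd : c = '.' ∨ c = '-' := by
            simp [goodChar] at hg; tauto
          rw [takeWhile_append_of_all pre [c] hall]
          simp [stripRolesScan, hsp, hcd, List.takeWhile, hg, hpre]

-- ===== VERDICT (by name: the statement is the Claim_ definition above) =====
theorem strip_roles_spec : Claim_equal_strip_roles := by
  intro primary _
  unfold Spec_strip_roles strip_roles strip_roles_alt
  rw [PySem.List.foldl_append_singleton_eq_map]
  rw [splitOn_single]
  have hmap : (mySplit ' ' [] primary.toList).map stripRolesPart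
      = (mySplit ' ' [] primary.toList).map (List.takeWhile goodChar) :=
    List.map_congr_left (fun p _ => stripRolesPart_eq_takeWhile p)
  rw [List.nil_append, hmap,
    join_map_cut_mySplit primary.toList [] false (by simp) (by simp)]
  simp
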